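-- pv_equiv track=rewrite | github.com/Alvaropz/Python_problems_BinarySearch | 1. Easy/task_hare/task_hare.py | task_hare
-- ===== SOURCE A (Python) =====
-- def task_hare(tasks, people):
--     tasks.sort()
--     people.sort()
--     finished_tasks = 0
--     i_people = 0
--     i_tasks = 0
--     j_people = len(people)-1
--     j_tasks = len(tasks)-1
--     while i_people <= j_people and i_tasks <= j_tasks:
--         if people[i_people] >= tasks[i_tasks]:
--             finished_tasks += 1
--             i_tasks += 1
--         i_people += 1
--     return finished_tasks
-- ===== SOURCE B (Python) =====
-- def task_hare(tasks, people):
--     tasks.sort()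
--     people.sort()
--     m = len(people)
--
--     def feasible(k):
--         # the k easiest tasks are all doable iff, pairing them in order
--         # with the k strongest people, every pair fits
--         return all(t <= p for t, p in zip(tasks[:k], people[m - k:]))
--
--     lo, hi = 0, min(len(tasks), m)
--     while lo < hi:
--         mid = (lo + hi + 1) // 2
--         if feasible(mid):
--             lo = mid
--         else:
--             hi = mid - 1
--     return lo
-- ===== Notes on version B (the rewrite author's own statement) =====
-- stated objective: alternative
-- what changed: A does a people-centric linear greedy sweep over the two sorted lists; B instead binary-searches the answer k, using the monotone feasibility predicate 'the k easiest tasks pair off with the k strongest people', never performing a greedy sweep.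
import Mathlib
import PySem

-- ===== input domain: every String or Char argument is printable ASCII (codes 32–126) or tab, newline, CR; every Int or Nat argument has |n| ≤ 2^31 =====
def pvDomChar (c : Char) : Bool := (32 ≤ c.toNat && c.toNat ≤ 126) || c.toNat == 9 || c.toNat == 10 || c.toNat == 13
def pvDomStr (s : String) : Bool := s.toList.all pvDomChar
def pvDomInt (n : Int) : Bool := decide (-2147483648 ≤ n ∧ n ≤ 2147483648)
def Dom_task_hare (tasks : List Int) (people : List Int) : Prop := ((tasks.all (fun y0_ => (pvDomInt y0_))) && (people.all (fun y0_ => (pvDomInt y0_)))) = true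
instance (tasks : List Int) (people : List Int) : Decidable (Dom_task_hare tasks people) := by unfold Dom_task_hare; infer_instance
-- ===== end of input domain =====

-- B replaces A's greedy sweep by a binary search over the answer with a pairing feasibility test:
-- an alternative algorithm, same cost. Both Pythons sort their arguments in place; the theorem is
-- about the return value only.

-- ===== PORT A =====
-- A's while loop over indices i_people/i_tasks, rendered as structural recursion on the
-- suffixes people[i_people:], tasks[i_tasks:] (loop runs while both suffixes are nonempty).
def aLoop : List Int → List Int → Int
  | p :: ps, t :: ts => if p ≥ t then 1 + aLoop ps ts else aLoop ps (t :: ts)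
  | _, _ => 0

def task_hare (tasks : List Int) (people : List Int) : Int :=
  aLoop (PySem.List.sorted people (fun x => x) false) (PySem.List.sorted tasks (fun x => x) false)

-- ===== PORT B =====
-- feasible(k): all(t <= p for t, p in zip(tasks[:k], people[m-k:])); k and m-k are natural
-- numbers here (0 <= k <= m throughout the search), so the slices are take/drop exactly.
def feasB (ts ps : List Int) (k : Nat) : Bool :=
  ((ts.take k).zip (ps.drop (ps.length - k))).all (fun tp => decide (tp.1 ≤ tp.2))

-- the while lo < hi binary-search loop
def bsearch (ts ps : List Int) (lo hi : Nat) : Nat :=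
  if lo < hi then
    if feasB ts ps ((lo + hi + 1) / 2) then bsearch ts ps ((lo + hi + 1) / 2) hi
    else bsearch ts ps lo ((lo + hi + 1) / 2 - 1)
  else lo
termination_by hi - lo
decreasing_by all_goals omega

def task_hare_alt (tasks : List Int) (people : List Int) : Int :=
  ((bsearch (PySem.List.sorted tasks (fun x => x) false)
            (PySem.List.sorted people (fun x => x) false)
            0
            (min (PySem.List.sorted tasks (fun x => x) false).length
                 (PySem.List.sorted people (fun x => x) false).length) : Nat) : Int)

-- ===== PRECONDITION & SPEC =====
def Spec_task_hare (tasks : List Int) (people : List Int) (out : Int) : Prop := out = task_hare_alt tasks people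
instance (tasks : List Int) (people : List Int) (out : Int) : Decidable (Spec_task_hare tasks people out) := by unfold Spec_task_hare; infer_instance

-- ===== CLAIM (what is proved, stated in full; the proofs are below) =====
def Claim_equal_task_hare : Prop := ∀ (tasks : List Int) (people : List Int), Dom_task_hare tasks people → Spec_task_hare tasks people (task_hare tasks people)

-- ===== LEMMAS AND PROOFS =====

-- Nat-valued mirror of aLoop
def cnt : List Int → List Int → Nat
  | p :: ps, t :: ts => if p ≥ t then 1 + cnt ps ts else cnt ps (t :: ts)
  | _, _ => 0

theorem aLoop_eq_cnt (ps ts : List Int) : aLoop ps ts = (cnt ps ts : Int) := by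
  induction ps generalizing ts with
  | nil => cases ts <;> simp [aLoop, cnt]
  | cons p ps ih =>
    cases ts with
    | nil => simp [aLoop, cnt]
    | cons t ts =>
      by_cases h : p ≥ t <;> simp [aLoop, cnt, h, ih]

theorem cnt_le (ps ts : List Int) : cnt ps ts ≤ min ts.length ps.length := by
  induction ps generalizing ts with
  | nil => cases ts <;> simp [cnt]
  | cons p ps ih =>
    cases ts with
    | nil => simp [cnt]
    | cons t ts =>
      by_cases h : p ≥ t
      · have := ih ts; simp [cnt, h]; omega
      · have := ih (t :: ts); simp [cnt, h] at this ⊢; omega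

-- feasibility as an indexed Prop: the first k tasks pair with the last k people
def Gd (ts ps : List Int) (k : Nat) : Prop :=
  ∀ i, i < k → ts.getD i 0 ≤ ps.getD (ps.length - k + i) 0

theorem feasB_iff (ts ps : List Int) (k : Nat) (hk1 : k ≤ ts.length) (hk2 : k ≤ ps.length) :
    feasB ts ps k = true ↔ Gd ts ps k := by
  unfold feasB Gd
  rw [List.all_eq_true]
  constructor
  · intro h i hik
    have hlen : i < ((ts.take k).zip (ps.drop (ps.length - k))).length := by
      simp; omega
    have hmem := List.getElem_mem hlen
    have := h _ hmem
    simp only [List.getElem_zip, List.getElem_take, List.getElem_drop, decide_eq_true_eq] at this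
    rwa [List.getD_eq_getElem ts 0 (by omega), List.getD_eq_getElem ps 0 (by omega)]
  · intro h x hx
    obtain ⟨i, hi, rfl⟩ := List.mem_iff_getElem.mp hx
    have hik : i < k := by simp at hi; omega
    simp only [List.getElem_zip, List.getElem_take, List.getElem_drop, decide_eq_true_eq]
    have := h i hik
    rwa [List.getD_eq_getElem ts 0 (by omega), List.getD_eq_getElem ps 0 (by omega)] at this

-- achievability: the greedy count is feasible (ps sorted ascending)
theorem cnt_feas (ps ts : List Int) (hps : ps.Pairwise (· ≤ ·)) : Gd ts ps (cnt ps ts) := by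
  induction ps generalizing ts with
  | nil => cases ts <;> exact fun i hi => by simp [cnt] at hi
  | cons p ps ih =>
    obtain ⟨hp, hps'⟩ := List.pairwise_cons.mp hps
    cases ts with
    | nil => intro i hi; simp [cnt] at hi
    | cons t ts =>
      by_cases h : p ≥ t
      · have hc' := cnt_le ps ts
        have ihg := ih ts hps'
        intro i hi
        simp only [cnt, if_pos h] at hi ⊢
        match i with
        | 0 =>
          -- t ≤ (p::ps)[|ps| - cnt ps ts]
          have hidx : (p :: ps).length - (1 + cnt ps ts) + 0 = ps.length - cnt ps ts := by
            simp; omega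
          rw [hidx]
          rcases Nat.eq_zero_or_pos (ps.length - cnt ps ts) with h0 | hpos
          · rw [h0]; simpa using h
          · obtain ⟨j, hj⟩ := Nat.exists_eq_succ_of_ne_zero (Nat.pos_iff_ne_zero.mp hpos)
            rw [hj, List.getD_cons_succ, List.getD_eq_getElem ps 0 (by omega)]
            exact le_trans h (hp _ (List.getElem_mem _))
        | i' + 1 =>
          have hi' : i' < cnt ps ts := by omega
          have hidx : (p :: ps).length - (1 + cnt ps ts) + (i' + 1)
              = (ps.length - cnt ps ts + i') + 1 := by simp; omega
          rw [hidx, List.getD_cons_succ, List.getD_cons_succ]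
          exact ihg i' hi'
      · have hc := cnt_le ps (t :: ts)
        have ihg := ih (t :: ts) hps'
        intro i hi
        simp only [cnt, if_neg h] at hi ⊢
        have hidx : (p :: ps).length - cnt ps (t :: ts) + i
            = (ps.length - cnt ps (t :: ts) + i) + 1 := by simp at hc ⊢; omega
        rw [hidx, List.getD_cons_succ]
        exact ihg i hi

-- maximality: any feasible k is at most the greedy count
theorem cnt_max (ps ts : List Int) (k : Nat)
    (hk : k ≤ min ts.length ps.length) (hG : Gd ts ps k) : k ≤ cnt ps ts := by
  induction ps generalizing ts k with
  | nil => simp at hk; omega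
  | cons p ps ih =>
    cases ts with
    | nil => simp at hk; omega
    | cons t ts =>
      by_cases h : p ≥ t
      · simp only [cnt, if_pos h]
        match k with
        | 0 => omega
        | k' + 1 =>
          have hk' : k' ≤ min ts.length ps.length := by simp at hk ⊢; omega
          have hG' : Gd ts ps k' := by
            intro i hi
            have := hG (i + 1) (by omega)
            have hidx : (p :: ps).length - (k' + 1) + (i + 1)
                = (ps.length - k' + i) + 1 := by simp at hk ⊢; omega
            rwa [hidx, List.getD_cons_succ, List.getD_cons_succ] at this
          have := ih ts k' hk' hG'
          omega
      · simp only [cnt, if_neg h]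
        rcases Nat.lt_or_ge k ((p :: ps).length) with hsmall | hbig
        · have hk' : k ≤ min (t :: ts).length ps.length := by simp at hk hsmall ⊢; omega
          apply ih (t :: ts) k hk'
          intro i hi
          have := hG i hi
          have hidx : (p :: ps).length - k + i = (ps.length - k + i) + 1 := by
            simp at hsmall ⊢; omega
          rwa [hidx, List.getD_cons_succ] at this
        · exfalso
          have hkm : k = (p :: ps).length := by simp at hk hbig ⊢; omega
          have := hG 0 (by simp at hkm; omega)
          rw [hkm] at this
          simp at this
          omega

-- downward closure (ps sorted): feasibility at k+1 implies feasibility at k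
theorem Gd_pred (ts ps : List Int) (k : Nat) (hps : ps.Pairwise (· ≤ ·))
    (hk : k + 1 ≤ min ts.length ps.length) (h : Gd ts ps (k + 1)) : Gd ts ps k := by
  intro i hi
  have h1 := h i (by omega)
  have hmono : ps.getD (ps.length - (k + 1) + i) 0 ≤ ps.getD (ps.length - k + i) 0 := by
    have ha : ps.length - (k + 1) + i < ps.length := by omega
    have hb : ps.length - k + i < ps.length := by omega
    rw [List.getD_eq_getElem ps 0 ha, List.getD_eq_getElem ps 0 hb]
    rcases Nat.lt_or_ge (ps.length - (k + 1) + i) (ps.length - k + i) with hlt | hge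
    · exact (List.pairwise_iff_getElem.mp hps) _ _ ha hb hlt
    · have : ps.length - (k + 1) + i = ps.length - k + i := by omega
      simp [this]
  calc ts.getD i 0 ≤ ps.getD (ps.length - (k + 1) + i) 0 := h1
    _ ≤ _ := hmono

theorem Gd_down (ts ps : List Int) (hps : ps.Pairwise (· ≤ ·)) :
    ∀ b, b ≤ min ts.length ps.length → Gd ts ps b → ∀ a, a ≤ b → Gd ts ps a := by
  intro b
  induction b with
  | zero => intro _ hG a ha; exact (Nat.le_zero.mp ha) ▸ hG
  | succ b ih =>
    intro hb hG a ha
    rcases Nat.eq_or_lt_of_le ha with rfl | hlt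
    · exact hG
    · exact ih (by omega) (Gd_pred ts ps b hps hb hG) a (by omega)

theorem bsearch_eq (ts ps : List Int) (c : Nat)
    (hub : ∀ k, k ≤ min ts.length ps.length → feasB ts ps k = true → k ≤ c)
    (hlb : ∀ k, k ≤ c → k ≤ min ts.length ps.length → feasB ts ps k = true) :
    ∀ n lo hi, hi - lo ≤ n → lo ≤ c → c ≤ hi → hi ≤ min ts.length ps.length →
      bsearch ts ps lo hi = c := by
  intro n
  induction n with
  | zero =>
    intro lo hi h1 h2 h3 _
    rw [bsearch, if_neg (by omega)]
    omega
  | succ n ih =>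
    intro lo hi h1 h2 h3 hhi
    rw [bsearch]
    by_cases hlh : lo < hi
    · rw [if_pos hlh]
      by_cases hf : feasB ts ps ((lo + hi + 1) / 2) = true
      · rw [if_pos hf]
        have hmid : (lo + hi + 1) / 2 ≤ c := hub _ (by omega) hf
        exact ih _ _ (by omega) hmid h3 hhi
      · rw [if_neg hf]
        have hc : c < (lo + hi + 1) / 2 := by
          by_contra hge
          exact hf (hlb _ (by omega) (by omega))
        exact ih _ _ (by omega) h2 (by omega) (by omega)
    · rw [if_neg hlh]; omega

theorem task_hare_spec : Claim_equal_task_hare := by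
  intro tasks people _
  unfold Spec_task_hare task_hare task_hare_alt
  set ts := PySem.List.sorted tasks (fun x => x) false with hts
  set ps := PySem.List.sorted people (fun x => x) false with hps
  have hsorted : ps.Pairwise (· ≤ ·) := by
    have := PySem.List.sorted_pairwise (xs := people) (key := fun x => x)
    simpa using this
  have heq : bsearch ts ps 0 (min ts.length ps.length) = cnt ps ts := by
    apply bsearch_eq ts ps (cnt ps ts) _ _ (min ts.length ps.length) 0 _ (by omega)
      (by omega) (cnt_le ps ts) (le_refl _)
    · intro k hk hf
      exact cnt_max ps ts k hk ((feasB_iff ts ps k (by omega) (by omega)).mp hf)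
    · intro k hkc hk
      apply (feasB_iff ts ps k (by omega) (by omega)).mpr
      exact Gd_down ts ps hsorted (cnt ps ts) (cnt_le ps ts) (cnt_feas ps ts hsorted) k hkc
  rw [aLoop_eq_cnt, heq]
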